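-- pv_equiv track=rewrite | github.com/hkust-nlp/model-task-align-rl | SynLogic/games/tasks/star_placement_puzzle/scripts/star_placement_puzzle.py | _format_solution
-- ===== SOURCE A (Python) =====
-- def _format_solution(solution, region_grid):
--     """
--     将解决方案格式化为答案字符串
--
--     @param solution: 星星位置的集合
--     @param region_grid: 区域网格
--     @return: 格式化的答案字符串
--     """
--     # 收集每个区域的星星坐标
--     regions_stars = {}
--     for r, c in solution:
--         region = region_grid[r][c]
--         if region not in regions_stars:
--             regions_stars[region] = []
--         # 使用1-索引
--         regions_stars[region].append((r+1, c+1))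
--
--     # 按区域字母排序
--     formatted_parts = []
--     for region in sorted(regions_stars.keys()):
--         # 按行排序，再按列排序
--         coords = sorted(regions_stars[region])
--         coords_str = ''.join([f"({r},{c})" for r, c in coords])
--         formatted_parts.append(f"{region}{coords_str}")
--
--     # 用换行符连接不同区域
--     return "[[" + "\n\n".join(formatted_parts) + "]]"
-- ===== SOURCE B (Python) =====
-- def _format_solution(solution, region_grid):
--     regions = sorted(set(region_grid[r][c] for r, c in solution))
--     coords = sorted(solution)
--     parts = [region + ''.join("(%d,%d)" % (r + 1, c + 1)
--                               for r, c in coords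
--                               if region_grid[r][c] == region)
--              for region in regions]
--     return "[[" + "\n\n".join(parts) + "]]"
-- ===== Notes on version B (the rewrite author's own statement) =====
-- stated objective: simpler
-- what changed: Replaces A's dict-of-buckets (built per region, each bucket sorted separately, keys sorted at the end) by one global sort of the coordinate list plus sorted(set(...)) of the regions and a per-region filter over the single sorted list.
import Mathlib
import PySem

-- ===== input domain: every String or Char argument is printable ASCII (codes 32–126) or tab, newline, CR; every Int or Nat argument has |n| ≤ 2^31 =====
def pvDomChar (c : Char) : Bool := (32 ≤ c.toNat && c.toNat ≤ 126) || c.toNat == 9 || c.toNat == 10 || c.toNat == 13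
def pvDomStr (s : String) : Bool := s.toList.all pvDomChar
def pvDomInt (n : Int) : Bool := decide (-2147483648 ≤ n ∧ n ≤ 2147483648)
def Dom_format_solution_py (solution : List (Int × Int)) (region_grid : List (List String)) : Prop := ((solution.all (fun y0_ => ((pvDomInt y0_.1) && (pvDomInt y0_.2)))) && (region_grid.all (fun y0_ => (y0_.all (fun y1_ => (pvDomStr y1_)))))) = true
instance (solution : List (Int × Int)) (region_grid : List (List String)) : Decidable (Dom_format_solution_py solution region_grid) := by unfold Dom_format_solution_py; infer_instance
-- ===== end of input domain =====

-- B replaces A's per-region dict buckets (each bucket sorted separately) by one global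
-- coordinate sort plus a per-region filter over the sorted list; objective: simpler.

-- region_grid[r][c] with Python's negative-index rule; exact under Pre_ (both lookups in range)
def pvReg (region_grid : List (List String)) (p : Int × Int) : String :=
  (PySem.List.pyGet? ((PySem.List.pyGet? region_grid p.1).getD []) p.2).getD ""

-- f"({r},{c})"
def pvFmt (q : Int × Int) : String :=
  "(" ++ PySem.Int.toStr q.1 ++ "," ++ PySem.Int.toStr q.2 ++ ")"

-- ===== PORT A =====
-- body of A's first loop: bucket the star (1-indexed) under its region
def stepA (region_grid : List (List String)) (d : PySem.Dict String (List (Int × Int)))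
    (p : Int × Int) : PySem.Dict String (List (Int × Int)) :=
  let region := pvReg region_grid p
  let d1 := if d.contains region then d else d.insert region []
  d1.modify region [] (fun l => l ++ [(p.1 + 1, p.2 + 1)])

def format_solution_py (solution : List (Int × Int)) (region_grid : List (List String)) : String :=
  "[[" ++ PySem.Str.join "\n\n"
    ((PySem.List.sorted (solution.foldl (stepA region_grid) PySem.Dict.empty).keys (fun k => k) false).foldl
      (fun acc region =>
        acc ++ [region ++ PySem.Str.join ""
          ((PySem.List.sorted2 ((solution.foldl (stepA region_grid) PySem.Dict.empty).getD region [])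
            (fun q => q.1) (fun q => q.2) false).map pvFmt)]) []) ++ "]]"

-- ===== PORT B =====
def format_solution_py_alt (solution : List (Int × Int)) (region_grid : List (List String)) : String :=
  "[[" ++ PySem.Str.join "\n\n"
    ((PySem.List.sorted (PySem.Set.ofList (solution.map (pvReg region_grid))) (fun k => k) false).map
      (fun region =>
        region ++ PySem.Str.join ""
          (((PySem.List.sorted2 solution (fun p => p.1) (fun p => p.2) false).filter
              (fun p => pvReg region_grid p == region)).map (fun p => pvFmt (p.1 + 1, p.2 + 1))))) ++ "]]"

-- ===== PRECONDITION & SPEC =====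
-- Pre_ excludes exactly the inputs where A raises IndexError: some star's row/column
-- index is out of range for region_grid (Python's negative-index rule included).
def Pre_format_solution_py (solution : List (Int × Int)) (region_grid : List (List String)) : Prop :=
  ∀ p ∈ solution,
    ((PySem.List.pyGet? region_grid p.1).bind (fun row => PySem.List.pyGet? row p.2)).isSome = true
instance (solution : List (Int × Int)) (region_grid : List (List String)) : Decidable (Pre_format_solution_py solution region_grid) := by unfold Pre_format_solution_py; infer_instance

def pvWitness_format_solution_py : (List (Int × Int)) × List (List String) :=
  ([(0, 0), (1, 1)], [["A", "B"], ["B", "A"]])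

def Spec_format_solution_py (solution : List (Int × Int)) (region_grid : List (List String)) (out : String) : Prop := out = format_solution_py_alt solution region_grid
instance (solution : List (Int × Int)) (region_grid : List (List String)) (out : String) : Decidable (Spec_format_solution_py solution region_grid out) := by unfold Spec_format_solution_py; infer_instance

-- ===== CLAIM (what is proved, stated in full; the proofs are below) =====
def Claim_equal_format_solution_py : Prop := ∀ (solution : List (Int × Int)) (region_grid : List (List String)), Dom_format_solution_py solution region_grid → Pre_format_solution_py solution region_grid → Spec_format_solution_py solution region_grid (format_solution_py solution region_grid)

-- ===== LEMMAS AND PROOFS =====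

-- Python's lexicographic "<" on int pairs, as sorted2 compares with keys fst/snd
def pvLt (a b : Int × Int) : Bool :=
  decide (a.1 < b.1) || (!decide (b.1 < a.1) && decide (a.2 < b.2))

-- "a does not come strictly after b": the sortedness relation of sorted2
def pvR (a b : Int × Int) : Prop := pvLt b a = false

-- the insertion-sort core shared by both ports' sorted2 calls
def sortF (l : List (Int × Int)) : List (Int × Int) :=
  l.foldl (fun acc x => PySem.List.insertBy pvLt x acc) []

theorem sorted2_eq_sortF (l : List (Int × Int)) :
    PySem.List.sorted2 l (fun q => q.1) (fun q => q.2) false = sortF l := rfl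

theorem pvLt_iff (a b : Int × Int) :
    pvLt a b = true ↔ (a.1 < b.1 ∨ (¬ b.1 < a.1 ∧ a.2 < b.2)) := by
  simp [pvLt]

theorem pvLt_false_iff (a b : Int × Int) :
    pvLt a b = false ↔ ¬ (a.1 < b.1 ∨ (¬ b.1 < a.1 ∧ a.2 < b.2)) := by
  rw [← pvLt_iff]; simp

theorem insertBy_pairwise (x : Int × Int) (ys : List (Int × Int)) (h : ys.Pairwise pvR) :
    (PySem.List.insertBy pvLt x ys).Pairwise pvR := by
  induction ys with
  | nil => simp [PySem.List.insertBy]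
  | cons y ys ih =>
    by_cases hxy : pvLt x y = true
    · rw [show PySem.List.insertBy pvLt x (y :: ys) = x :: y :: ys by
        simp [PySem.List.insertBy, hxy]]
      refine List.Pairwise.cons ?_ h
      intro z hz
      rcases List.mem_cons.mp hz with rfl | hz
      · unfold pvR
        rw [pvLt_iff] at hxy; rw [pvLt_false_iff]
        push Not; omega
      · have hyz : pvR y z := (List.pairwise_cons.mp h).1 z hz
        unfold pvR at *
        rw [pvLt_false_iff] at hyz ⊢; rw [pvLt_iff] at hxy
        push Not at hyz ⊢; omega
    · rw [show PySem.List.insertBy pvLt x (y :: ys) = y :: PySem.List.insertBy pvLt x ys by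
        simp [PySem.List.insertBy, hxy]]
      refine List.Pairwise.cons ?_ (ih (List.Pairwise.of_cons h))
      intro z hz
      rcases (PySem.List.mem_insertBy pvLt x z ys).mp hz with rfl | hz
      · exact Bool.eq_false_iff.mpr hxy
      · exact (List.pairwise_cons.mp h).1 z hz

theorem sortF_pairwise_aux (l : List (Int × Int)) :
    ∀ acc : List (Int × Int), acc.Pairwise pvR →
      (l.foldl (fun acc x => PySem.List.insertBy pvLt x acc) acc).Pairwise pvR := by
  induction l with
  | nil => intro acc h; simpa using h
  | cons x l ih =>
    intro acc h
    exact ih _ (insertBy_pairwise x acc h)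

theorem sortF_pairwise (l : List (Int × Int)) : (sortF l).Pairwise pvR :=
  sortF_pairwise_aux l [] List.Pairwise.nil

theorem insertBy_all_before (x : Int × Int) (zs : List (Int × Int))
    (h : ∀ z ∈ zs, pvLt x z = true) :
    PySem.List.insertBy pvLt x zs = x :: zs := by
  cases zs with
  | nil => simp [PySem.List.insertBy]
  | cons z zs => simp [PySem.List.insertBy, h z (by simp)]

theorem filter_insertBy (p : Int × Int → Bool) (x : Int × Int) (ys : List (Int × Int))
    (h : ys.Pairwise pvR) :
    (PySem.List.insertBy pvLt x ys).filter p =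
      if p x then PySem.List.insertBy pvLt x (ys.filter p) else ys.filter p := by
  induction ys with
  | nil =>
    simp only [PySem.List.insertBy, List.filter_nil]
    by_cases hx : p x <;> simp [hx]
  | cons y ys ih =>
    by_cases hxy : pvLt x y = true
    · rw [show PySem.List.insertBy pvLt x (y :: ys) = x :: y :: ys by
        simp [PySem.List.insertBy, hxy]]
      have hall : ∀ z ∈ (y :: ys).filter p, pvLt x z = true := by
        intro z hz
        have hz' := List.mem_filter.mp hz
        rcases List.mem_cons.mp hz'.1 with rfl | hzys
        · exact hxy
        · have hyz : pvR y z := (List.pairwise_cons.mp h).1 z hzys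
          unfold pvR at hyz
          rw [pvLt_false_iff] at hyz; rw [pvLt_iff] at hxy ⊢
          push Not at hyz; omega
      by_cases hx : p x = true
      · rw [if_pos hx, insertBy_all_before x _ hall]
        simp [List.filter_cons, hx]
      · rw [if_neg hx]
        simp [List.filter_cons, hx]
    · rw [show PySem.List.insertBy pvLt x (y :: ys) = y :: PySem.List.insertBy pvLt x ys by
        simp [PySem.List.insertBy, hxy]]
      have ih' := ih (List.Pairwise.of_cons h)
      by_cases hy : p y = true
      · by_cases hx : p x = true
        · rw [List.filter_cons_of_pos hy, List.filter_cons_of_pos hy, if_pos hx,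
            show PySem.List.insertBy pvLt x (y :: ys.filter p)
              = y :: PySem.List.insertBy pvLt x (ys.filter p) by
              simp [PySem.List.insertBy, hxy]]
          rw [ih', if_pos hx]
        · rw [List.filter_cons_of_pos hy, List.filter_cons_of_pos hy, if_neg hx, ih', if_neg hx]
      · rw [List.filter_cons_of_neg (by simpa using hy), List.filter_cons_of_neg (by simpa using hy), ih']

theorem sortF_append_singleton (l : List (Int × Int)) (x : Int × Int) :
    sortF (l ++ [x]) = PySem.List.insertBy pvLt x (sortF l) := by
  unfold sortF
  rw [List.foldl_append]
  rfl

theorem filter_sortF (p : Int × Int → Bool) (l : List (Int × Int)) :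
    (sortF l).filter p = sortF (l.filter p) := by
  induction l using List.reverseRecOn with
  | nil => rfl
  | append_singleton l x ih =>
    rw [sortF_append_singleton, filter_insertBy p x _ (sortF_pairwise l), ih,
      List.filter_append]
    by_cases hx : p x = true
    · simp only [List.filter_cons, hx, if_pos, List.filter_nil]
      rw [sortF_append_singleton]
    · simp only [List.filter_cons, hx]
      simp [sortF]

theorem pvLt_shift (a b : Int × Int) :
    pvLt (a.1 + 1, a.2 + 1) (b.1 + 1, b.2 + 1) = pvLt a b := by
  simp [pvLt]

theorem insertBy_map_shift (x : Int × Int) (ys : List (Int × Int)) :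
    PySem.List.insertBy pvLt (x.1 + 1, x.2 + 1) (ys.map (fun q => (q.1 + 1, q.2 + 1)))
      = (PySem.List.insertBy pvLt x ys).map (fun q => (q.1 + 1, q.2 + 1)) := by
  induction ys with
  | nil => simp [PySem.List.insertBy]
  | cons y ys ih =>
    by_cases hxy : pvLt x y = true
    · simp [PySem.List.insertBy, pvLt_shift, hxy]
    · simp [PySem.List.insertBy, pvLt_shift, hxy, ih]

theorem sortF_map_shift (l : List (Int × Int)) :
    sortF (l.map (fun q => (q.1 + 1, q.2 + 1))) = (sortF l).map (fun q => (q.1 + 1, q.2 + 1)) := by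
  induction l using List.reverseRecOn with
  | nil => rfl
  | append_singleton l x ih =>
    rw [List.map_append, List.map_singleton, sortF_append_singleton, sortF_append_singleton, ih,
      insertBy_map_shift]

-- the guarded empty-bucket insert does not change any lookup with default []
theorem getD_guard (d : PySem.Dict String (List (Int × Int))) (region k : String) :
    ((if d.contains region then d else d.insert region []) : PySem.Dict String (List (Int × Int))).getD k []
      = d.getD k [] := by
  by_cases hc : d.contains region = true
  · rw [if_pos hc]
  · rw [if_neg hc, PySem.Dict.getD_insert]
    by_cases hk : k = region
    · rw [if_pos hk, hk, PySem.Dict.getD_of_not_contains d [] (by simpa using hc)]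
    · rw [if_neg hk]

theorem getD_foldl_stepA (region_grid : List (List String)) :
    ∀ (l : List (Int × Int)) (d : PySem.Dict String (List (Int × Int))) (k : String),
      (l.foldl (stepA region_grid) d).getD k []
        = d.getD k [] ++ (l.filter (fun p => pvReg region_grid p == k)).map (fun p => (p.1 + 1, p.2 + 1)) := by
  intro l
  induction l with
  | nil => intro d k; simp
  | cons p l ih =>
    intro d k
    rw [List.foldl_cons, ih]
    have hstep : (stepA region_grid d p).getD k []
        = if k = pvReg region_grid p then d.getD k [] ++ [(p.1 + 1, p.2 + 1)] else d.getD k [] := by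
      unfold stepA
      rw [PySem.Dict.getD_modify]
      by_cases hk : k = pvReg region_grid p
      · rw [if_pos hk, if_pos hk, getD_guard, hk]
      · rw [if_neg hk, if_neg hk, getD_guard]
    rw [hstep, List.filter_cons]
    by_cases hk : k = pvReg region_grid p
    · have : (pvReg region_grid p == k) = true := by simp [hk]
      rw [this, if_pos hk]
      simp
    · have : (pvReg region_grid p == k) = false := by
        simp only [beq_eq_false_iff_ne, ne_eq]; exact fun h => hk h.symm
      rw [this, if_neg hk]
      simp

theorem keys_stepA (region_grid : List (List String)) (d : PySem.Dict String (List (Int × Int)))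
    (p : Int × Int) :
    (stepA region_grid d p).keys = PySem.Set.add d.keys (pvReg region_grid p) := by
  unfold stepA
  rw [PySem.Dict.keys_modify]
  by_cases hc : d.contains (pvReg region_grid p) = true
  · rw [if_pos hc, PySem.Dict.keys_insert_of_contains _ _ hc]
    unfold PySem.Set.add
    rw [if_pos]
    rw [PySem.Dict.contains_eq_decide_mem_keys] at hc
    simpa [List.contains_iff_mem] using hc
  · rw [if_neg hc, PySem.Dict.keys_insert_of_contains, PySem.Dict.keys_insert_of_not_contains _ _ (by simpa using hc)]
    · unfold PySem.Set.add
      rw [if_neg]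
      rw [PySem.Dict.contains_eq_decide_mem_keys] at hc
      simpa [List.contains_iff_mem] using hc
    · exact PySem.Dict.contains_insert_self _ _ _

theorem keys_foldl_stepA (region_grid : List (List String)) :
    ∀ (l : List (Int × Int)) (d : PySem.Dict String (List (Int × Int))),
      (l.foldl (stepA region_grid) d).keys = PySem.Set.update d.keys (l.map (pvReg region_grid)) := by
  intro l
  induction l with
  | nil => intro d; rfl
  | cons p l ih =>
    intro d
    rw [List.foldl_cons, ih, List.map_cons]
    rw [show ∀ (s : PySem.Set String) xs x, PySem.Set.update s (x :: xs) = PySem.Set.update (PySem.Set.add s x) xs from fun s xs x => rfl]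
    rw [keys_stepA]

-- ===== VERDICT (by name: the statement is the Claim_ definition above) =====
theorem format_solution_py_spec : Claim_equal_format_solution_py := by
  intro solution region_grid _hdom _hpre
  unfold Spec_format_solution_py format_solution_py format_solution_py_alt
  rw [PySem.List.foldl_append_singleton_eq_map
      (f := fun region => region ++ PySem.Str.join ""
        ((PySem.List.sorted2 ((solution.foldl (stepA region_grid) PySem.Dict.empty).getD region [])
          (fun q => q.1) (fun q => q.2) false).map pvFmt))]
  rw [List.nil_append]
  rw [keys_foldl_stepA]
  rw [show (PySem.Dict.empty : PySem.Dict String (List (Int × Int))).keys = ([] : List String) from rfl]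
  rw [show PySem.Set.update ([] : PySem.Set String) (solution.map (pvReg region_grid))
      = PySem.Set.ofList (solution.map (pvReg region_grid)) from rfl]
  congr 3
  apply List.map_congr_left
  intro k _hk
  congr 1
  rw [getD_foldl_stepA, PySem.Dict.getD_empty, List.nil_append]
  rw [sorted2_eq_sortF, sorted2_eq_sortF, sortF_map_shift, ← filter_sortF]
  simp only [List.map_map]
  rfl
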